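-- pv_equiv track=rewrite | github.com/Wulfic/Cicada3301 | Tools/page55_literal_f.py | decrypt_with_literal_f
-- ===== SOURCE A (Python) =====
-- PRIMES = [2, 3, 5, 7, 11, 13, 17, 19, 23, 29, 31, 37, 41, 43, 47, 53, 59, 61,
--           67, 71, 73, 79, 83, 89, 97, 101, 103, 107, 109, 113, 127, 131, 137,
--           139, 149, 151, 157, 163, 167, 173, 179, 181, 191, 193, 197, 199, 211,
--           223, 227, 229, 233, 239, 241, 251, 257, 263, 269, 271, 277, 281, 283,
--           293, 307, 311, 313, 317, 331, 337, 347, 349, 353, 359, 367, 373, 379,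
--           383, 389, 397, 401, 409, 419, 421, 431, 433, 439, 443, 449, 457, 461]
--
-- def phi(n):
--     return n - 1 if n >= 2 else 0
--
-- def decrypt_with_literal_f(cipher, literal_f_positions):
--     """Decrypt with specific positions treated as literal F."""
--     prime_idx = 0
--     result = []
--
--     for i in range(len(cipher)):
--         c_idx = cipher[i]
--
--         if i in literal_f_positions:
--             result.append(0)  # F
--             # DON'T increment prime_idx
--         else:
--             k = phi(PRIMES[prime_idx % len(PRIMES)]) % 29
--             p = (c_idx - k) % 29
--             result.append(p)
--             prime_idx += 1
--
--     return result
-- ===== SOURCE B (Python) =====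
-- PRIMES = [2, 3, 5, 7, 11, 13, 17, 19, 23, 29, 31, 37, 41, 43, 47, 53, 59, 61,
--           67, 71, 73, 79, 83, 89, 97, 101, 103, 107, 109, 113, 127, 131, 137,
--           139, 149, 151, 157, 163, 167, 173, 179, 181, 191, 193, 197, 199, 211,
--           223, 227, 229, 233, 239, 241, 251, 257, 263, 269, 271, 277, 281, 283,
--           293, 307, 311, 313, 317, 331, 337, 347, 349, 353, 359, 367, 373, 379,
--           383, 389, 397, 401, 409, 419, 421, 431, 433, 439, 443, 449, 457, 461]
--
--
-- def decrypt_with_literal_f(cipher, literal_f_positions):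
--     """Decrypt with specific positions treated as literal F."""
--     n = len(cipher)
--     # phase 1: which positions are literal F
--     flags = [i in literal_f_positions for i in range(n)]
--     # phase 2: prefix sums -- lits_before[i] = number of literal positions < i
--     lits_before = []
--     acc = 0
--     for f in flags:
--         lits_before.append(acc)
--         acc += f
--     # phase 3: the prime index at position i is i - lits_before[i], a closed form;
--     # no running counter is carried through the decryption itself
--     return [0 if flags[i]
--             else (cipher[i] - (PRIMES[(i - lits_before[i]) % len(PRIMES)] - 1) % 29) % 29
--             for i in range(n)]
-- ===== Notes on version B (the rewrite author's own statement) =====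
-- stated objective: alternative
-- what changed: Eliminates A's loop-carried conditional prime counter and append-built result: B computes a boolean literal-flag table, a prefix-sum table of literal counts, and then derives each position's prime index by the closed form i - lits_before[i] in a final comprehension; phi is dropped since all PRIMES are >= 2.
import Mathlib
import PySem

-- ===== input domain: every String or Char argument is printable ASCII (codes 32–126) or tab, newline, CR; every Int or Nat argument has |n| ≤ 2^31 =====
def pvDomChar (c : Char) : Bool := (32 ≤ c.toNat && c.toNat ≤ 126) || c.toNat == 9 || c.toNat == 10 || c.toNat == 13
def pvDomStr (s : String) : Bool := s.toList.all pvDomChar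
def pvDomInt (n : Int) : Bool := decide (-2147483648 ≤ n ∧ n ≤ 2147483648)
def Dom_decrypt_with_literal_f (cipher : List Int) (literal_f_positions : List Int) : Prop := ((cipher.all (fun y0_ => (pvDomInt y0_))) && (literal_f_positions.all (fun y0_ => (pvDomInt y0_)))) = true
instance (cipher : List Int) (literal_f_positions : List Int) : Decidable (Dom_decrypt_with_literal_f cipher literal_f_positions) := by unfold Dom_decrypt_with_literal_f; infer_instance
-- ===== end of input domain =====

-- B removes A's loop-carried conditional prime counter: it computes the literal flags,
-- then prefix sums of literals, and derives each prime index by the closed form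
-- i - lits_before[i]; phi is dropped because every PRIMES entry is >= 2.

-- ===== PORT A =====
def PRIMES : List Int := [2, 3, 5, 7, 11, 13, 17, 19, 23, 29, 31, 37, 41, 43, 47, 53, 59, 61,
          67, 71, 73, 79, 83, 89, 97, 101, 103, 107, 109, 113, 127, 131, 137,
          139, 149, 151, 157, 163, 167, 173, 179, 181, 191, 193, 197, 199, 211,
          223, 227, 229, 233, 239, 241, 251, 257, 263, 269, 271, 277, 281, 283,
          293, 307, 311, 313, 317, 331, 337, 347, 349, 353, 359, 367, 373, 379,
          383, 389, 397, 401, 409, 419, 421, 431, 433, 439, 443, 449, 457, 461]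

def phi (n : Int) : Int := if n ≥ 2 then n - 1 else 0

def decrypt_with_literal_f (cipher : List Int) (literal_f_positions : List Int) : List Int :=
  (((PySem.List.pyRange 0 (cipher.length : Int) 1).foldl
    (fun (st : Int × List Int) i =>
      let c_idx := PySem.List.pyGetD cipher i 0
      if i ∈ literal_f_positions then
        (st.1, st.2 ++ [(0 : Int)])
      else
        let k := PySem.Int.mod (phi (PySem.List.pyGetD PRIMES (PySem.Int.mod st.1 (PRIMES.length : Int)) 0)) 29
        let p := PySem.Int.mod (c_idx - k) 29
        (st.1 + 1, st.2 ++ [p]))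
    ((0 : Int), ([] : List Int))).2)

-- ===== PORT B =====
def decrypt_with_literal_f_alt (cipher : List Int) (literal_f_positions : List Int) : List Int :=
  let n := cipher.length
  -- phase 1: which positions are literal F
  let flags := (PySem.List.pyRange 0 (n : Int) 1).map (fun i => decide (i ∈ literal_f_positions))
  -- phase 2: prefix sums -- lits_before[i] = number of literal positions < i
  let lits_before := (flags.foldl
    (fun (st : List Int × Int) f => (st.1 ++ [st.2], st.2 + (if f then 1 else 0)))
    (([] : List Int), (0 : Int))).1
  -- phase 3: prime index at position i is the closed form i - lits_before[i]
  (PySem.List.pyRange 0 (n : Int) 1).map (fun i =>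
    if PySem.List.pyGetD flags i false then 0
    else PySem.Int.mod ((PySem.List.pyGetD cipher i 0)
      - PySem.Int.mod ((PySem.List.pyGetD PRIMES
          (PySem.Int.mod (i - PySem.List.pyGetD lits_before i 0) (PRIMES.length : Int)) 0) - 1) 29) 29)

-- ===== PRECONDITION & SPEC =====
def Spec_decrypt_with_literal_f (cipher : List Int) (literal_f_positions : List Int) (out : List Int) : Prop := out = decrypt_with_literal_f_alt cipher literal_f_positions
instance (cipher : List Int) (literal_f_positions : List Int) (out : List Int) : Decidable (Spec_decrypt_with_literal_f cipher literal_f_positions out) := by unfold Spec_decrypt_with_literal_f; infer_instance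

-- ===== CLAIM (what is proved, stated in full; the proofs are below) =====
def Claim_equal_decrypt_with_literal_f : Prop := ∀ (cipher : List Int) (literal_f_positions : List Int), Dom_decrypt_with_literal_f cipher literal_f_positions → Spec_decrypt_with_literal_f cipher literal_f_positions (decrypt_with_literal_f cipher literal_f_positions)

-- ===== LEMMAS AND PROOFS =====

-- number of decrypt (non-literal) positions among 0..N-1
def pvCnt (lfp : List Int) (N : Nat) : Nat :=
  ((PySem.List.pyRange 0 (N : Int) 1).filter (fun i => decide (i ∉ lfp))).length

-- number of literal positions among 0..N-1, counted as B's phase 1/2 do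
def pvLits (lfp : List Int) (N : Nat) : Nat :=
  (((PySem.List.pyRange 0 (N : Int) 1).map (fun i => decide (i ∈ lfp))).count true)

-- the common per-index value of both programs at decrypt position m with counter c
def pvEnc (cipher : List Int) (m : Nat) (c : Nat) : Int :=
  PySem.Int.mod ((PySem.List.pyGetD cipher (m : Int) 0)
    - PySem.Int.mod ((PySem.List.pyGetD PRIMES (PySem.Int.mod (c : Int) (PRIMES.length : Int)) 0) - 1) 29) 29

-- the common result, as a map over all indices
def pvBody (cipher lfp : List Int) (m : Nat) : Int :=
  if (m : Int) ∈ lfp then 0 else pvEnc cipher m (pvCnt lfp m)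

theorem pvPrimes_ge_two (x : Int) (hx : x ∈ PRIMES) : 2 ≤ x := by
  have h : PRIMES.all (fun x => decide (2 ≤ x)) = true := by decide
  have := List.all_eq_true.mp h x hx
  simpa using this

theorem pvGetD_mem (j : Int) : PySem.List.pyGetD PRIMES (PySem.Int.mod j (PRIMES.length : Int)) 0 ∈ PRIMES := by
  apply PySem.List.pyGetD_mem
  constructor
  · have := PySem.Int.mod_nonneg j (b := (PRIMES.length : Int)) (by decide)
    omega
  · have := PySem.Int.mod_lt j (b := (PRIMES.length : Int)) (by decide)
    omega

theorem pvCnt_succ (lfp : List Int) (N : Nat) :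
    pvCnt lfp (N + 1) = pvCnt lfp N + (if (N : Int) ∈ lfp then 0 else 1) := by
  unfold pvCnt
  rw [show ((N + 1 : Nat) : Int) = (N : Int) + 1 by push_cast; ring]
  rw [PySem.List.pyRange_one_succ_right (by positivity)]
  rw [List.filter_append]
  by_cases h : (N : Int) ∈ lfp <;> simp [h]

theorem pvLits_succ (lfp : List Int) (N : Nat) :
    pvLits lfp (N + 1) = pvLits lfp N + (if (N : Int) ∈ lfp then 1 else 0) := by
  unfold pvLits
  rw [show ((N + 1 : Nat) : Int) = (N : Int) + 1 by push_cast; ring]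
  rw [PySem.List.pyRange_one_succ_right (by positivity)]
  rw [List.map_append, List.count_append]
  by_cases h : (N : Int) ∈ lfp <;> simp [h]

-- counting decrypt and literal positions partitions 0..N-1
theorem pvCnt_add_pvLits (lfp : List Int) (N : Nat) :
    pvCnt lfp N + pvLits lfp N = N := by
  induction N with
  | zero => simp [pvCnt, pvLits]
  | succ n ih =>
    rw [pvCnt_succ, pvLits_succ]
    by_cases h : (n : Int) ∈ lfp <;> simp [h] <;> omega

-- A's fold over range 0..N computes (count, map of pvBody)
theorem pvA_char (cipher lfp : List Int) (N : Nat) :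
    ((PySem.List.pyRange 0 (N : Int) 1).foldl
      (fun (st : Int × List Int) i =>
        let c_idx := PySem.List.pyGetD cipher i 0
        if i ∈ lfp then
          (st.1, st.2 ++ [(0 : Int)])
        else
          let k := PySem.Int.mod (phi (PySem.List.pyGetD PRIMES (PySem.Int.mod st.1 (PRIMES.length : Int)) 0)) 29
          let p := PySem.Int.mod (c_idx - k) 29
          (st.1 + 1, st.2 ++ [p]))
      ((0 : Int), ([] : List Int)))
    = (((pvCnt lfp N : Nat) : Int), (List.range N).map (pvBody cipher lfp)) := by
  induction N with
  | zero => simp [pvCnt]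
  | succ n ih =>
    rw [show ((n + 1 : Nat) : Int) = (n : Int) + 1 by push_cast; ring]
    rw [PySem.List.pyRange_one_succ_right (by positivity), List.foldl_append, ih]
    rw [List.range_succ, List.map_append]
    simp only [List.foldl_cons, List.foldl_nil]
    by_cases h : (n : Int) ∈ lfp
    · simp [h, pvCnt_succ, pvBody]
    · simp only [h, if_false]
      rw [pvCnt_succ]
      have h2 : (2:Int) ≤ PySem.List.pyGetD PRIMES (PySem.Int.mod ((pvCnt lfp n : Nat) : Int) (PRIMES.length : Int)) 0 :=
        pvPrimes_ge_two _ (pvGetD_mem _)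
      rw [PySem.Int.mod_eq_emod_of_pos (by decide)] at h2
      simp [h, pvBody, pvEnc, phi, h2]

-- B's phase-2 fold builds exactly the list of prefix literal counts
theorem pvPrefAux (flags : List Bool) (acc : List Int) (c : Int) :
    (flags.foldl
      (fun (st : List Int × Int) f => (st.1 ++ [st.2], st.2 + (if f then 1 else 0)))
      (acc, c)).1
    = acc ++ (List.range flags.length).map (fun m => c + (((flags.take m).count true : Nat) : Int)) := by
  induction flags generalizing acc c with
  | nil => simp
  | cons f fs ih =>
    simp only [List.foldl_cons]
    rw [ih]
    rw [List.length_cons, List.range_succ_eq_map]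
    simp only [List.map_cons, List.map_map, List.take_zero, List.count_nil, List.take_succ_cons,
      List.count_cons, List.append_assoc, List.cons_append, List.nil_append, Nat.cast_zero, add_zero]
    congr 1
    congr 1
    apply List.map_congr_left
    intro m _
    by_cases hf : f
    · simp [hf]
      ring
    · simp [hf]

-- B index by index equals pvBody
theorem pvB_char (cipher lfp : List Int) :
    decrypt_with_literal_f_alt cipher lfp = (List.range cipher.length).map (pvBody cipher lfp) := by
  unfold decrypt_with_literal_f_alt
  dsimp only
  rw [PySem.List.pyRange_zero_natCast]
  simp only [List.map_map, Function.comp_def]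
  apply List.map_congr_left
  intro m hm
  have hm' : m < cipher.length := List.mem_range.mp hm
  simp only [PySem.List.pyGetD_natCast]
  rw [pvPrefAux]
  rw [List.nil_append]
  simp only [List.length_map, List.length_range]
  rw [PySem.List.getD_map_range _ _ _ _ hm']
  rw [PySem.List.getD_map_range _ _ _ _ hm']
  rw [← List.map_take, List.take_range]
  have hmin : min m cipher.length = m := by omega
  rw [hmin]
  have hl : (((List.range m).map (fun k : Nat => decide ((k : Int) ∈ lfp))).count true : Int)
      = ((pvLits lfp m : Nat) : Int) := by
    simp [pvLits, PySem.List.pyRange_zero_natCast, List.map_map, Function.comp_def]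
  rw [hl]
  have hc : (m : Int) - (0 + ((pvLits lfp m : Nat) : Int)) = ((pvCnt lfp m : Nat) : Int) := by
    have := pvCnt_add_pvLits lfp m
    push_cast
    omega
  rw [hc]
  unfold pvBody pvEnc
  by_cases h : (m : Int) ∈ lfp <;> simp [h]

-- ===== VERDICT (by name: the statement is the Claim_ definition above) =====
theorem decrypt_with_literal_f_spec : Claim_equal_decrypt_with_literal_f := by
  intro cipher lfp _
  unfold Spec_decrypt_with_literal_f
  unfold decrypt_with_literal_f
  rw [pvA_char, pvB_char]
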